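-- pv_equiv track=rewrite | github.com/RamyaRamasubramaniyan/PythonProjects | UseCases/LogExtractor.py | log_type_extract
-- ===== SOURCE A (Python) =====
-- def log_type_extract(lines):
--     info_list = []
--     error_list = []
--     warn_list = []
--     for line in lines:
--         if 'INFO' in line:
--             info_list.append(line)
--         elif 'ERROR' in line:
--             error_list.append(line)
--         elif 'WARN' in line:
--             warn_list.append(line)
--     return info_list, error_list, warn_list
-- ===== SOURCE B (Python) =====
-- def log_type_extract(lines):
--     info_list = [l for l in lines if 'INFO' in l]
--     error_list = [l for l in lines if 'ERROR' in l and 'INFO' not in l]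
--     warn_list = [l for l in lines if 'WARN' in l and 'ERROR' not in l and 'INFO' not in l]
--     return info_list, error_list, warn_list
-- ===== Notes on version B (the rewrite author's own statement) =====
-- stated objective: idiomatic
-- what changed: Replaces the single loop with an elif chain and three mutable accumulators by three independent filter comprehensions, one per category, with explicit exclusion of higher-priority keywords.
import Mathlib
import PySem

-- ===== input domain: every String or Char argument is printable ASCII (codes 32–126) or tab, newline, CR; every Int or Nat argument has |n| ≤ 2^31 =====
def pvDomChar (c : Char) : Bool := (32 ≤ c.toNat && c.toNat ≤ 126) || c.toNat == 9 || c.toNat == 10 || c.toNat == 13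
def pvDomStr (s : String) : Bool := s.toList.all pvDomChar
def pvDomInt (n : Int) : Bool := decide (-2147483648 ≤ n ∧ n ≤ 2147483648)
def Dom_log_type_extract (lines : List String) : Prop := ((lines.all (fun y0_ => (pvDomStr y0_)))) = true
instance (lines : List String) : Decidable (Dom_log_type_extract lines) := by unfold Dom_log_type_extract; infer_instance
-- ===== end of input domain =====

-- B replaces A's single elif-chain loop with three independent filter passes (idiomatic; same cost).

-- ===== PORT A =====
def log_type_extract (lines : List String) : List String × List String × List String :=
  let r := lines.foldl (fun (acc : List String × List String × List String) line =>
    if PySem.Str.isIn "INFO" line then (acc.1 ++ [line], acc.2.1, acc.2.2)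
    else if PySem.Str.isIn "ERROR" line then (acc.1, acc.2.1 ++ [line], acc.2.2)
    else if PySem.Str.isIn "WARN" line then (acc.1, acc.2.1, acc.2.2 ++ [line])
    else acc) ([], [], [])
  r

-- ===== PORT B =====
def log_type_extract_alt (lines : List String) : List String × List String × List String :=
  let info_list := lines.filter (fun l => PySem.Str.isIn "INFO" l)
  let error_list := lines.filter (fun l => PySem.Str.isIn "ERROR" l && !PySem.Str.isIn "INFO" l)
  let warn_list := lines.filter (fun l => PySem.Str.isIn "WARN" l && !PySem.Str.isIn "ERROR" l && !PySem.Str.isIn "INFO" l)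
  (info_list, error_list, warn_list)

-- ===== PRECONDITION & SPEC =====
def Spec_log_type_extract (lines : List String) (out : List String × List String × List String) : Prop := out = log_type_extract_alt lines
instance (lines : List String) (out : List String × List String × List String) : Decidable (Spec_log_type_extract lines out) := by unfold Spec_log_type_extract; infer_instance

-- ===== CLAIM (what is proved, stated in full; the proofs are below) =====
def Claim_equal_log_type_extract : Prop := ∀ (lines : List String), Dom_log_type_extract lines → Spec_log_type_extract lines (log_type_extract lines)

-- ===== LEMMAS AND PROOFS =====

theorem log_type_extract_loop (p q r : String → Bool) (lines : List String) (i e w : List String) :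
    lines.foldl (fun (acc : List String × List String × List String) line =>
      if p line then (acc.1 ++ [line], acc.2.1, acc.2.2)
      else if q line then (acc.1, acc.2.1 ++ [line], acc.2.2)
      else if r line then (acc.1, acc.2.1, acc.2.2 ++ [line])
      else acc) (i, e, w)
    = (i ++ lines.filter p,
       e ++ lines.filter (fun l => q l && !p l),
       w ++ lines.filter (fun l => r l && !q l && !p l)) := by
  induction lines generalizing i e w with
  | nil => simp
  | cons hd tl ih =>
    simp only [List.foldl_cons, List.filter_cons]
    by_cases h1 : p hd = true <;>
      by_cases h2 : q hd = true <;>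
        by_cases h3 : r hd = true <;>
          simp [h1, h2, h3, ih]

-- ===== VERDICT (by name: the statement is the Claim_ definition above) =====
theorem log_type_extract_spec : Claim_equal_log_type_extract := by
  intro lines _
  unfold Spec_log_type_extract log_type_extract log_type_extract_alt
  rw [log_type_extract_loop]
  rfl
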